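-- pv_equiv track=rewrite | github.com/Hackel15/Marquette-Projects | COSC 1002 (PYTHON)/Week_6/Act.py | pwd
-- ===== SOURCE A (Python) =====
-- def pwd(aString):
--     result = ""
--     val = 0
--     for letter in aString:
--         if letter in "aeiouAEIOU":
--             result += str(val)
--             val += 1
--         else:
--             result += letter
--     return result
-- ===== SOURCE B (Python) =====
-- def pwd(aString):
--     vowels = "aeiouAEIOU"
--     counts = []
--     k = 0
--     for ch in aString:
--         counts.append(k)
--         if ch in vowels:
--             k += 1
--     return "".join(str(k) if ch in vowels else ch for ch, k in zip(aString, counts))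
-- ===== Notes on version B (the rewrite author's own statement) =====
-- stated objective: alternative
-- what changed: Two-pass scheme: first pass records, for every position, the number of vowels strictly before it; a zip/join comprehension then renders each character from its precomputed count, instead of A's single loop accumulating a growing string and counter together.
import Mathlib
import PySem

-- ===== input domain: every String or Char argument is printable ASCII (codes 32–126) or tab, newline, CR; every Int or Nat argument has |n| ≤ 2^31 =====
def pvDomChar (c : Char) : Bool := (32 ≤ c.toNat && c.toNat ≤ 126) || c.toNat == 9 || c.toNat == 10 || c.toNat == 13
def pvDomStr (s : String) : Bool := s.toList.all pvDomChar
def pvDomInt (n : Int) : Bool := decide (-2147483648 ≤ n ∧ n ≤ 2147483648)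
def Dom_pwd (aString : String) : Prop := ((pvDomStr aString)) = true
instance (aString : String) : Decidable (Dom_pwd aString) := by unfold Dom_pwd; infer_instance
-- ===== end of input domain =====

-- B replaces A's single accumulating loop by a two-pass scheme (prefix vowel counts, then zip/join); alternative structure, same cost.

-- 'letter in "aeiouAEIOU"', shared by both programs
def vch (c : Char) : Bool := "aeiouAEIOU".toList.contains c

-- ===== PORT A =====
def pwd (aString : String) : String :=
  (aString.toList.foldl
    (fun (st : String × Int) letter =>
      if vch letter then
        (st.1 ++ PySem.Int.toStr st.2, st.2 + 1)
      else
        (st.1 ++ String.ofList [letter], st.2)) ("", 0)).1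

-- ===== PORT B =====
-- B's first pass: counts[i] = number of vowels strictly before position i
def pwdCounts (cs : List Char) : List Int :=
  (cs.foldl
    (fun (st : List Int × Int) ch =>
      (st.1 ++ [st.2], if vch ch then st.2 + 1 else st.2)) ([], 0)).1

def pwd_alt (aString : String) : String :=
  PySem.Str.join "" ((aString.toList.zip (pwdCounts aString.toList)).map
    (fun p => if vch p.1 then PySem.Int.toStr p.2 else String.ofList [p.1]))

-- ===== PRECONDITION & SPEC =====
def Spec_pwd (aString : String) (out : String) : Prop := out = pwd_alt aString
instance (aString : String) (out : String) : Decidable (Spec_pwd aString out) := by unfold Spec_pwd; infer_instance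

-- ===== CLAIM (what is proved, stated in full; the proofs are below) =====
def Claim_equal_pwd : Prop := ∀ (aString : String), Dom_pwd aString → Spec_pwd aString (pwd aString)

-- ===== LEMMAS AND PROOFS =====

-- reference spec, at the level of character lists
def pwdChars (cs : List Char) (v : Int) : List Char :=
  match cs with
  | [] => []
  | c :: cs' =>
    (if vch c then (PySem.Int.toStr v).toList else [c])
      ++ pwdChars cs' (if vch c then v + 1 else v)

-- A's loop computes pwdChars
theorem pwd_foldl_eq (cs : List Char) : ∀ (res : String) (v : Int),
    ((cs.foldl
      (fun (st : String × Int) letter =>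
        if vch letter then
          (st.1 ++ PySem.Int.toStr st.2, st.2 + 1)
        else
          (st.1 ++ String.ofList [letter], st.2)) (res, v)).1).toList
      = res.toList ++ pwdChars cs v := by
  induction cs with
  | nil => intro res v; simp [pwdChars]
  | cons c cs ih =>
    intro res v
    by_cases h : vch c
    · simp [List.foldl, h, pwdChars, ih]
    · simp [List.foldl, h, pwdChars, ih]

-- the prefix-count list B's first pass builds
def countsFrom (cs : List Char) (k : Int) : List Int :=
  match cs with
  | [] => []
  | c :: cs' => k :: countsFrom cs' (if vch c then k + 1 else k)

theorem counts_foldl_eq (cs : List Char) : ∀ (acc : List Int) (k : Int),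
    (cs.foldl
      (fun (st : List Int × Int) ch =>
        (st.1 ++ [st.2], if vch ch then st.2 + 1 else st.2)) (acc, k)).1
      = acc ++ countsFrom cs k := by
  induction cs with
  | nil => intro acc k; simp [countsFrom]
  | cons c cs ih =>
    intro acc k
    by_cases h : vch c
    · simp [List.foldl, h, countsFrom, ih]
    · simp [List.foldl, h, countsFrom, ih]

theorem joinNil (xs : List (List Char)) : PySem.Chars.join ([] : List Char) xs = xs.flatten := by
  induction xs with
  | nil => simp [PySem.Chars.join, List.intercalate]
  | cons a xs ih =>
    cases xs with
    | nil => simp [PySem.Chars.join, List.intercalate]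
    | cons b ys =>
      rw [PySem.Chars.join_cons_cons, ih]
      simp

-- B's second pass, fed with countsFrom, computes pwdChars
theorem join_zip_eq (cs : List Char) : ∀ (k : Int),
    ((cs.zip (countsFrom cs k)).map
      (String.toList ∘ fun p => if vch p.1 then PySem.Int.toStr p.2 else String.ofList [p.1])).flatten
      = pwdChars cs k := by
  induction cs with
  | nil => intro k; simp [countsFrom, pwdChars]
  | cons c cs ih =>
    intro k
    by_cases h : vch c
    · simp [countsFrom, pwdChars, h, ih, Function.comp]
    · simp [countsFrom, pwdChars, h, ih, Function.comp]

-- ===== VERDICT (by name: the statement is the Claim_ definition above) =====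
theorem pwd_spec : Claim_equal_pwd := by
  intro aString _
  unfold Spec_pwd pwd pwd_alt pwdCounts
  apply String.toList_injective
  rw [counts_foldl_eq, pwd_foldl_eq, PySem.Str.toList_join]
  simp only [String.toList_empty, List.nil_append]
  rw [joinNil, List.map_map, join_zip_eq]
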